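-- pv_equiv track=rewrite | github.com/football-investment/practice-booking-system | scripts/fix_duplicate_imports.py | clean_import_section
-- ===== SOURCE A (Python) =====
-- from typing import List, Set, Tuple, Dict
--
-- def clean_import_section(deduplicated: List[str]) -> List[str]:
--     """
--     Clean up the deduplicated import section:
--     - Remove excessive empty lines
--     - Ensure proper grouping
--     """
--     cleaned = []
--     prev_empty = False
--
--     for line in deduplicated:
--         stripped = line.strip()
--
--         # Handle empty lines
--         if not stripped:
--             if not prev_empty and cleaned:  # Allow one empty line, but not at start
--                 cleaned.append(line)
--                 prev_empty = True
--         else: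
--             cleaned.append(line)
--             prev_empty = False
--
--     # Remove trailing empty lines from import section
--     while cleaned and not cleaned[-1].strip():
--         cleaned.pop()
--
--     return cleaned
-- ===== SOURCE B (Python) =====
-- def clean_import_section(deduplicated):
--     """Single forward run-skipping scan: drop leading blanks, then for each
--     blank run skip to its end and keep its first line only if content follows."""
--     n = len(deduplicated)
--     i = 0
--     # drop leading blank lines
--     while i < n and not deduplicated[i].strip():
--         i += 1
--     out = []
--     while i < n:
--         head = deduplicated[i]
--         if head.strip():
--             out.append(head)
--             i += 1
--         else:
--             # skip the whole blank run
--             while i < n and not deduplicated[i].strip():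
--                 i += 1
--             if i < n:  # interior run: keep exactly its first blank line
--                 out.append(head)
--     return out
-- ===== Notes on version B (the rewrite author's own statement) =====
-- stated objective: alternative
-- what changed: Replaces A's prev_empty flag plus separate trailing-pop loop by a single forward run-skipping scan: leading blanks are dropped, each interior blank run is skipped in one inner step keeping only its first line, and trailing blank runs are never emitted at all.
import Mathlib
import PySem

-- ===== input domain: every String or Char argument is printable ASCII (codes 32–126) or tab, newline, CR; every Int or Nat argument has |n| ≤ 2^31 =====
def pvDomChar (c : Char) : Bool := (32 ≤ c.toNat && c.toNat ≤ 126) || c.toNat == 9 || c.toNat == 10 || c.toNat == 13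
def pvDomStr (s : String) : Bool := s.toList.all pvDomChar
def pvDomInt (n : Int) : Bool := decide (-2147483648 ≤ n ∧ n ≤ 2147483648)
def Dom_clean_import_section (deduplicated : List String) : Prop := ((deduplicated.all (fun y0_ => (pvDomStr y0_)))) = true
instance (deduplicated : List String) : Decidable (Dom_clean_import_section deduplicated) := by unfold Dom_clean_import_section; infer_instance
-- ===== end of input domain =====

-- B replaces A's prev_empty flag + trailing-pop loop by a single forward run-skipping scan (alternative decomposition, same cost).

-- ===== PORT A =====
-- 'line.strip() is empty'
def pvBlank (line : String) : Bool := PySem.Str.strip line == ""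

-- the body of A's for-loop over (cleaned, prev_empty)
def pvStepA (st : List String × Bool) (line : String) : List String × Bool :=
  if pvBlank line then
    if !st.2 && !st.1.isEmpty then (st.1 ++ [line], true) else st
  else (st.1 ++ [line], false)

def clean_import_section (deduplicated : List String) : List String :=
  let cleaned := (deduplicated.foldl pvStepA ([], false)).1
  -- while cleaned and not cleaned[-1].strip(): cleaned.pop()  (pops trailing blank lines)
  (cleaned.reverse.dropWhile pvBlank).reverse

-- ===== PORT B =====
-- B's main while loop: run-skipping scan
def pvGoB : List String → List String
  | [] => []
  | x :: xs =>
    if pvBlank x then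
      let rest := xs.dropWhile pvBlank
      if rest.isEmpty then [] else x :: pvGoB rest
    else x :: pvGoB xs
termination_by l => l.length
decreasing_by
  · have := List.length_dropWhile_le pvBlank xs; simp; omega
  · simp

def clean_import_section_alt (deduplicated : List String) : List String :=
  pvGoB (deduplicated.dropWhile pvBlank)

-- ===== PRECONDITION & SPEC =====
def Spec_clean_import_section (deduplicated : List String) (out : List String) : Prop := out = clean_import_section_alt deduplicated
instance (deduplicated : List String) (out : List String) : Decidable (Spec_clean_import_section deduplicated out) := by unfold Spec_clean_import_section; infer_instance

-- ===== CLAIM (what is proved, stated in full; the proofs are below) =====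
def Claim_equal_clean_import_section : Prop := ∀ (deduplicated : List String), Dom_clean_import_section deduplicated → Spec_clean_import_section deduplicated (clean_import_section deduplicated)

-- ===== LEMMAS AND PROOFS =====

-- reference recursion for A's first pass, parametrised by prev_empty
def pvG (p : Bool) : List String → List String
  | [] => []
  | x :: xs => if pvBlank x then (if p then pvG p xs else x :: pvG true xs) else x :: pvG false xs

-- right-trim, as A's while-pop loop computes it
def pvRtrim (l : List String) : List String := (l.reverse.dropWhile pvBlank).reverse

theorem pvRtrim_cons (x : String) (l : List String) :
    pvRtrim (x :: l) = if pvBlank x ∧ pvRtrim l = [] then [] else x :: pvRtrim l := by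
  unfold pvRtrim
  by_cases h : (l.reverse.dropWhile pvBlank) = []
  · simp [List.dropWhile_append, h]
    by_cases hb : pvBlank x <;> simp [List.dropWhile, hb]
  · have : ¬ ((l.reverse.dropWhile pvBlank).isEmpty) := by simpa [List.isEmpty_iff] using h
    simp [List.dropWhile_append, this, h]

theorem pvG_true (xs : List String) : pvG true xs = pvG false (xs.dropWhile pvBlank) := by
  induction xs with
  | nil => rfl
  | cons x xs ih =>
    by_cases hb : pvBlank x <;> simp [pvG, hb, List.dropWhile, ih]

theorem pvFoldlA (xs : List String) : ∀ (acc : List String) (p : Bool), acc ≠ [] →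
    (xs.foldl pvStepA (acc, p)).1 = acc ++ pvG p xs := by
  induction xs with
  | nil => intro acc p h; simp [pvG]
  | cons x xs ih =>
    intro acc p h
    by_cases hb : pvBlank x
    · cases p
      · have : (acc ++ [x]) ≠ [] := by simp
        simp [pvStepA, hb, h, pvG, ih _ _ this]
      · simp [pvStepA, hb, pvG, ih _ _ h]
    · have : (acc ++ [x]) ≠ [] := by simp
      simp [pvStepA, hb, pvG, ih _ _ this]

theorem pvFoldlA_lead (xs : List String) :
    (xs.foldl pvStepA ([], false)).1 = pvG false (xs.dropWhile pvBlank) := by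
  induction xs with
  | nil => rfl
  | cons x xs ih =>
    by_cases hb : pvBlank x
    · simpa [pvStepA, hb, List.dropWhile] using ih
    · have : ([x] : List String) ≠ [] := by simp
      simp [pvStepA, hb, List.dropWhile, pvG, pvFoldlA xs _ _ this]

theorem pvDropWhile_head {x : String} {xs l : List String}
    (h : l.dropWhile pvBlank = x :: xs) : pvBlank x = false := by
  induction l with
  | nil => simp at h
  | cons a l ih =>
    by_cases hb : pvBlank a
    · exact ih (by simpa [List.dropWhile, hb] using h)
    · rw [List.dropWhile_cons_of_neg (by simpa using hb)] at h
      cases h; simpa using hb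

theorem pvGoB_eq (n : Nat) : ∀ l : List String, l.length ≤ n → pvGoB l = pvRtrim (pvG false l) := by
  induction n with
  | zero => intro l h; simp at h; simp [h, pvGoB, pvG, pvRtrim]
  | succ n ih =>
    intro l hlen
    match l with
    | [] => simp [pvGoB, pvG, pvRtrim]
    | x :: xs =>
      by_cases hb : pvBlank x
      · rw [pvGoB]
        simp only [hb, if_true]
        rw [pvG]; simp only [hb, if_true, pvG_true]
        rcases hrest : xs.dropWhile pvBlank with _ | ⟨b, ys⟩
        · simp [pvG, pvRtrim, hb]
        · have hbb : pvBlank b = false := pvDropWhile_head hrest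
          have hlb : (b :: ys).length ≤ n := by
            have h1 := List.length_dropWhile_le pvBlank xs
            rw [hrest] at h1
            simp only [List.length_cons] at hlen
            omega
          rw [ih _ hlb]
          have hg : pvG false (b :: ys) = b :: pvG false ys := by
            rw [pvG]; simp [hbb]
          have hne : pvRtrim (pvG false (b :: ys)) ≠ [] := by
            rw [hg, pvRtrim_cons]; simp [hbb]
          simp [pvRtrim_cons, hne, hb]
      · rw [pvGoB]; simp only [hb, Bool.false_eq_true, if_false]
        rw [pvG]; simp only [hb, Bool.false_eq_true, if_false]
        rw [ih xs (by simp at hlen; omega), pvRtrim_cons]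
        simp [hb]

-- ===== VERDICT (by name: the statement is the Claim_ definition above) =====
theorem clean_import_section_spec : Claim_equal_clean_import_section := by
  intro dedup _
  unfold Spec_clean_import_section clean_import_section clean_import_section_alt
  rw [pvFoldlA_lead]
  exact (pvGoB_eq _ _ le_rfl).symm
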